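-- pv_equiv track=rewrite | github.com/rdc501/advent-of-code | 2023/3/solution.py | get_part_numbers
-- ===== SOURCE A (Python) =====
-- def get_part_numbers(previous_row, current_row, next_row, current_row_index, possible_gears):
--     index = 0
--     result = []
--
--     while index < len(current_row):
--         found_number = get_number(current_row[index:], "")
--
--         if found_number:
--             symbols = ["!", "*", "$", "&", "=", "-", "/", "%", "@", "#", "+"]
--             if has_adjacent_symbol(previous_row,
--                                    current_row,
--                                    next_row,
--                                    index,
--                                    len(found_number),
--                                    symbols,
--                                    current_row_index):
--                 result.append(found_number)
--
--             possible_gear_location = has_adjacent_symbol(previous_row,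
--                                    current_row,
--                                    next_row,
--                                    index,
--                                    len(found_number),
--                                    ["*"],
--                                    current_row_index)
--             if possible_gear_location:
--                 possible_gears[possible_gear_location] = possible_gears.get(possible_gear_location, []) + [found_number]
--
--             index += len(found_number)
--         else:
--             index += 1
--
--     return result
--
-- def get_number(string, current_number):
--     if string and string[0].isdigit():
--         return get_number(string[1:], current_number + string[0])
--     else:
--         return current_number
--
-- def has_adjacent_symbol(previous_row, current_row, next_row, start_index, size, symbols, current_row_index):
--     lowest_index = start_index - 1
--     highest_index = start_index + size
--
--     if lowest_index == -1:
--         lowest_index = 0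
--
--     if highest_index >= len(current_row):
--         highest_index = len(current_row) - 1
--
--     symbol_index = None
--
--     if current_row[lowest_index] in symbols:
--         symbol_index = (current_row_index, lowest_index)
--     if current_row[highest_index] in symbols:
--         symbol_index = (current_row_index, highest_index)
--
--     index = lowest_index
--     while index < len(previous_row) and index <= highest_index:
--         if previous_row[index] in symbols:
--             in_previous_row = True
--             symbol_index = (current_row_index - 1, index)
--             break
--         index += 1
--
--     index = lowest_index
--     while index < len(next_row) and index <= highest_index:
--         if next_row[index] in symbols:
--             in_next_row = True
--             symbol_index = (current_row_index + 1, index)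
--             break
--         index += 1
--
--     return symbol_index
-- ===== SOURCE B (Python) =====
-- # B: collect all maximal digit spans in one grouping pass, then filter them with an
-- # early-return adjacency search (reverse precedence order of A's last-write-wins scans).
-- # Mutates possible_gears in place exactly like A.
--
-- def first_match(row, lo, hi, symbols):
--     return next((i for i in range(lo, min(hi, len(row) - 1) + 1) if row[i] in symbols), None)
--
-- def find_symbol(previous_row, current_row, next_row, start_index, size, symbols, current_row_index):
--     lo = start_index - 1
--     if lo == -1:
--         lo = 0
--     hi = start_index + size
--     if hi >= len(current_row):
--         hi = len(current_row) - 1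
--     j = first_match(next_row, lo, hi, symbols)
--     if j is not None:
--         return (current_row_index + 1, j)
--     j = first_match(previous_row, lo, hi, symbols)
--     if j is not None:
--         return (current_row_index - 1, j)
--     if current_row[hi] in symbols:
--         return (current_row_index, hi)
--     if current_row[lo] in symbols:
--         return (current_row_index, lo)
--     return None
--
-- def digit_spans(row):
--     spans = []
--     start = -1
--     for i, ch in enumerate(row):
--         if ch.isdigit():
--             if start < 0:
--                 start = i
--         elif start >= 0:
--             spans.append((start, i))
--             start = -1
--     if start >= 0:
--         spans.append((start, len(row)))
--     return spans
--
-- def get_part_numbers(previous_row, current_row, next_row, current_row_index, possible_gears):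
--     symbols = ["!", "*", "$", "&", "=", "-", "/", "%", "@", "#", "+"]
--     spans = digit_spans(current_row)
--     result = [current_row[a:b] for a, b in spans
--               if find_symbol(previous_row, current_row, next_row, a, b - a, symbols, current_row_index)]
--     for a, b in spans:
--         gear = find_symbol(previous_row, current_row, next_row, a, b - a, ["*"], current_row_index)
--         if gear:
--             possible_gears[gear] = possible_gears.get(gear, []) + [current_row[a:b]]
--     return result
-- ===== Notes on version B (the rewrite author's own statement) =====
-- stated objective: faster
-- what changed: Replaced the recursive get_number (which re-slices the remaining string for every digit) plus index-advancing while-loop with a single grouping pass that collects all maximal digit spans up front and then filters them, and replaced has_adjacent_symbol's last-write-wins accumulator and hand-written while-scans with an early-return chain over range-based first-match searches.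
import Mathlib
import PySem

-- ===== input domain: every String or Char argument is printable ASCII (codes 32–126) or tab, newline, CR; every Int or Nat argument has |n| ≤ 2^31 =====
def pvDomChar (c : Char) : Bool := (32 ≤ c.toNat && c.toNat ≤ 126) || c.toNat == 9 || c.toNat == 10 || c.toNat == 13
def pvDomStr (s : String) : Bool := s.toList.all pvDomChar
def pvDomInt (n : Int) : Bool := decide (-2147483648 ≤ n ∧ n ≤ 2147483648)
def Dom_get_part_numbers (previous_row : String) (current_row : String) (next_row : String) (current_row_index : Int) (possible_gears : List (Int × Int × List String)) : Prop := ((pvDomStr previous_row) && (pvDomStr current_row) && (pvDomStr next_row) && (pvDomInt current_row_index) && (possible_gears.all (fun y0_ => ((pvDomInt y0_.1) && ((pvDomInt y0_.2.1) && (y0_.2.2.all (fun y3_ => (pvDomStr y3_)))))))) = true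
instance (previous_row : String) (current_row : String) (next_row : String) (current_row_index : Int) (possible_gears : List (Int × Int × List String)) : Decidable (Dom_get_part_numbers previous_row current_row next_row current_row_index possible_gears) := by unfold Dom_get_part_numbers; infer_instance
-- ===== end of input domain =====

-- B replaces A's recursive get_number (which re-slices the suffix per digit) + index-advancing
-- while-loop by one grouping pass that collects all maximal digit spans, then filters them with
-- an early-return adjacency search (measured faster). Both Pythons also mutate possible_gears identically; that
-- in-place side effect is not part of the return value, so the equivalence proved here is about
-- the RETURN value only (the ports omit the dict update, which cannot reach the result).

-- the symbol list both Pythons write literally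
def pySymbols : List Char := ['!', '*', '$', '&', '=', '-', '/', '%', '@', '#', '+']

-- row[i]: the index is in range at every call site below, so the default is never read
def pyCharAt (row : List Char) (i : Nat) : Char := row.getD i ' '

-- ===== PORT A =====

-- get_number(string, current_number): longest digit prefix, accumulated front-to-back
def getNumber : List Char → List Char → List Char
  | [], acc => acc
  | c :: rest, acc =>
    if PySem.Chars.isdigit c then getNumber rest (acc ++ [c]) else acc

-- the two identical while-loops inside has_adjacent_symbol:
-- while index < len(row) and index <= highest_index: first symbol hit, else None
def scanA (row : List Char) (syms : List Char) (hi : Nat) (i : Nat) : Option Nat :=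
  if h : i < row.length ∧ i ≤ hi then
    if pyCharAt row i ∈ syms then some i else scanA row syms hi (i + 1)
  else none
termination_by hi + 1 - i
decreasing_by omega

-- has_adjacent_symbol: symbol_index as a last-write-wins accumulator, A's statement order.
-- Nat subtraction in 'start - 1' is exactly A's clamp of -1 to 0 (start is a Nat index here).
def hasAdjA (prev cur nxt : List Char) (start size : Nat) (syms : List Char) (ri : Int) : Option (Int × Int) :=
  let lo := start - 1
  let hi := if cur.length ≤ start + size then cur.length - 1 else start + size
  let s0 : Option (Int × Int) := none
  let s1 := if pyCharAt cur lo ∈ syms then some (ri, (lo : Int)) else s0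
  let s2 := if pyCharAt cur hi ∈ syms then some (ri, (hi : Int)) else s1
  let s3 := match scanA prev syms hi lo with
    | some j => some (ri - 1, (j : Int))
    | none => s2
  match scanA nxt syms hi lo with
  | some j => some (ri + 1, (j : Int))
  | none => s3

-- the outer while-loop of get_part_numbers (the possible_gears dict update is an in-place
-- side effect on the argument that never reaches the returned list; it is omitted)
def aLoop (prev cur nxt : List Char) (ri : Int) (i : Nat) (res : List String) : List String :=
  if h : i < cur.length then
    let found := getNumber (cur.drop i) []
    if hf : found.length = 0 then
      aLoop prev cur nxt ri (i + 1) res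
    else
      let res' := if (hasAdjA prev cur nxt i found.length pySymbols ri).isSome
                  then res ++ [String.ofList found] else res
      aLoop prev cur nxt ri (i + found.length) res'
  else res
termination_by cur.length - i
decreasing_by
  · omega
  · simp only [found] at hf ⊢
    omega

def get_part_numbers (previous_row : String) (current_row : String) (next_row : String) (current_row_index : Int) (possible_gears : List (Int × Int × List String)) : List String :=
  aLoop previous_row.toList current_row.toList next_row.toList current_row_index 0 []

-- ===== PORT B =====

-- first_match: next((i for i in range(lo, min(hi, len(row)-1)+1) if row[i] in symbols), None);
-- min(hi, len-1)+1 = min (hi+1) len over Nat (also when len = 0, where the range is empty)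
def firstMatch (row : List Char) (lo hi : Nat) (syms : List Char) : Option Nat :=
  (List.range' lo (min (hi + 1) row.length - lo)).find? (fun i => decide (pyCharAt row i ∈ syms))

-- find_symbol: early-return chain in reverse precedence order (indices in range as for A)
def findSymbol (prev cur nxt : List Char) (start size : Nat) (syms : List Char) (ri : Int) : Option (Int × Int) :=
  let lo := start - 1
  let hi := if cur.length ≤ start + size then cur.length - 1 else start + size
  match firstMatch nxt lo hi syms with
  | some j => some (ri + 1, (j : Int))
  | none =>
    match firstMatch prev lo hi syms with
    | some j => some (ri - 1, (j : Int))
    | none =>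
      if pyCharAt cur hi ∈ syms then some (ri, (hi : Int))
      else if pyCharAt cur lo ∈ syms then some (ri, (lo : Int))
      else none

-- the for-loop of digit_spans: state (spans so far, start of the open digit run)
def groupStep : Nat → Option Nat → List (Nat × Nat) → List Char → List (Nat × Nat) × Option Nat
  | _, st, sp, [] => (sp, st)
  | i, st, sp, c :: rest =>
    if PySem.Chars.isdigit c then
      groupStep (i + 1) (match st with | none => some i | some a => some a) sp rest
    else
      match st with
      | some a => groupStep (i + 1) none (sp ++ [(a, i)]) rest
      | none => groupStep (i + 1) none sp rest

-- trailing 'if start >= 0: spans.append((start, len(row)))'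
def finishSpans (p : List (Nat × Nat) × Option Nat) (e : Nat) : List (Nat × Nat) :=
  match p with
  | (sp, some a) => sp ++ [(a, e)]
  | (sp, none) => sp

def digitSpans (row : List Char) : List (Nat × Nat) :=
  finishSpans (groupStep 0 none [] row) row.length

-- the result comprehension: [cur[a:b] for a, b in spans if find_symbol(...)]
-- (cur[a:b] with 0 ≤ a ≤ b ≤ len cur is exactly (cur.drop a).take (b - a))
def collectParts (prev cur nxt : List Char) (ri : Int) (spans : List (Nat × Nat)) : List String :=
  spans.filterMap (fun ab =>
    if (findSymbol prev cur nxt ab.1 (ab.2 - ab.1) pySymbols ri).isSome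
    then some (String.ofList ((cur.drop ab.1).take (ab.2 - ab.1))) else none)

def get_part_numbers_alt (previous_row : String) (current_row : String) (next_row : String) (current_row_index : Int) (possible_gears : List (Int × Int × List String)) : List String :=
  collectParts previous_row.toList current_row.toList next_row.toList current_row_index
    (digitSpans current_row.toList)

-- ===== PRECONDITION & SPEC =====
def Spec_get_part_numbers (previous_row : String) (current_row : String) (next_row : String) (current_row_index : Int) (possible_gears : List (Int × Int × List String)) (out : List String) : Prop := out = get_part_numbers_alt previous_row current_row next_row current_row_index possible_gears
instance (previous_row : String) (current_row : String) (next_row : String) (current_row_index : Int) (possible_gears : List (Int × Int × List String)) (out : List String) : Decidable (Spec_get_part_numbers previous_row current_row next_row current_row_index possible_gears out) := by unfold Spec_get_part_numbers; infer_instance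

-- ===== CLAIM (what is proved, stated in full; the proofs are below) =====
def Claim_equal_get_part_numbers : Prop := ∀ (previous_row : String) (current_row : String) (next_row : String) (current_row_index : Int) (possible_gears : List (Int × Int × List String)), Dom_get_part_numbers previous_row current_row next_row current_row_index possible_gears → Spec_get_part_numbers previous_row current_row next_row current_row_index possible_gears (get_part_numbers previous_row current_row next_row current_row_index possible_gears)

-- ===== LEMMAS AND PROOFS =====

-- getNumber accumulates the digit prefix
theorem getNumber_eq (s : List Char) : ∀ acc, getNumber s acc = acc ++ s.takeWhile PySem.Chars.isdigit := by
  induction s with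
  | nil => intro acc; simp [getNumber]
  | cons c rest ih =>
    intro acc
    by_cases h : PySem.Chars.isdigit c <;> simp [getNumber, h, ih]

theorem take_takeWhile_len (p : Char → Bool) (l : List Char) :
    l.take (l.takeWhile p).length = l.takeWhile p :=
  (List.prefix_iff_eq_take.mp (List.takeWhile_prefix p)).symm

theorem drop_takeWhile_len (p : Char → Bool) (l : List Char) :
    l.drop (l.takeWhile p).length = l.dropWhile p := by
  induction l with
  | nil => simp
  | cons c rest ih => by_cases h : p c <;> simp [h, ih]

-- A's while-scan equals B's range-find (auxiliary induction on the remaining count)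
theorem scanA_eq_aux (row syms : List Char) (hi : Nat) :
    ∀ k i, min (hi + 1) row.length - i = k → scanA row syms hi i = firstMatch row i hi syms := by
  intro k
  induction k with
  | zero =>
    intro i h
    rw [scanA, dif_neg (by omega)]
    unfold firstMatch
    rw [h]
    simp
  | succ k ih =>
    intro i h
    have hc : i < row.length ∧ i ≤ hi := by omega
    rw [scanA, dif_pos hc]
    unfold firstMatch
    rw [h, List.range'_succ, List.find?_cons]
    by_cases hm : pyCharAt row i ∈ syms
    · simp [hm]
    · simp only [hm, decide_false]
      rw [ih (i + 1) (by omega)]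
      unfold firstMatch
      simp only [if_false]
      congr 2
      omega

theorem scanA_eq_firstMatch (row syms : List Char) (hi i : Nat) :
    scanA row syms hi i = firstMatch row i hi syms :=
  scanA_eq_aux row syms hi _ i rfl

-- the two adjacency helpers agree everywhere: A's accumulator, once the lets are inlined,
-- is exactly B's early-return chain
theorem hasAdjA_eq_findSymbol (prev cur nxt : List Char) (start size : Nat) (syms : List Char) (ri : Int) :
    hasAdjA prev cur nxt start size syms ri = findSymbol prev cur nxt start size syms ri := by
  unfold hasAdjA findSymbol
  simp only [scanA_eq_firstMatch]

-- reference span list: the maximal digit runs of l, positions offset by i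
def spansOf (i : Nat) (l : List Char) : List (Nat × Nat) :=
  match l with
  | [] => []
  | c :: rest =>
    if PySem.Chars.isdigit c then
      (i, i + ((c :: rest).takeWhile PySem.Chars.isdigit).length) ::
        spansOf (i + ((c :: rest).takeWhile PySem.Chars.isdigit).length)
          ((c :: rest).drop ((c :: rest).takeWhile PySem.Chars.isdigit).length)
    else spansOf (i + 1) rest
termination_by l.length
decreasing_by
  · simp_all
  · simp

theorem spansOf_nil (i : Nat) : spansOf i [] = [] := by
  rw [spansOf.eq_def]

theorem spansOf_cons (i : Nat) (c : Char) (rest : List Char) :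
    spansOf i (c :: rest) =
      if PySem.Chars.isdigit c then
        (i, i + ((c :: rest).takeWhile PySem.Chars.isdigit).length) ::
          spansOf (i + ((c :: rest).takeWhile PySem.Chars.isdigit).length)
            ((c :: rest).drop ((c :: rest).takeWhile PySem.Chars.isdigit).length)
      else spansOf (i + 1) rest := by
  rw [spansOf.eq_def]

-- the grouping fold produces exactly the maximal digit runs
theorem groupStep_spec : ∀ (l : List Char) (i : Nat) (sp : List (Nat × Nat)) (st : Option Nat),
    finishSpans (groupStep i st sp l) (i + l.length) = sp ++ (match st with
      | none => spansOf i l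
      | some a => (a, i + (l.takeWhile PySem.Chars.isdigit).length) ::
          spansOf (i + (l.takeWhile PySem.Chars.isdigit).length) (l.dropWhile PySem.Chars.isdigit)) := by
  intro l
  induction l with
  | nil =>
    intro i sp st
    cases st <;> simp [groupStep, finishSpans, spansOf_nil]
  | cons c rest ih =>
    intro i sp st
    have hlen : i + (c :: rest).length = (i + 1) + rest.length := by simp; omega
    by_cases hd : PySem.Chars.isdigit c
    · cases st with
      | none =>
        rw [groupStep, if_pos hd, hlen, ih (i + 1) sp (some i)]
        rw [spansOf_cons, if_pos hd]
        simp only [List.takeWhile_cons, hd, ite_true, List.length_cons, List.drop_succ_cons,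
          drop_takeWhile_len]
        have e : i + 1 + (List.takeWhile PySem.Chars.isdigit rest).length = i + ((List.takeWhile PySem.Chars.isdigit rest).length + 1) := by omega
        rw [e]
      | some a =>
        rw [groupStep, if_pos hd, hlen, ih (i + 1) sp (some a)]
        simp only [List.takeWhile_cons, hd, ite_true, List.length_cons, List.dropWhile_cons]
        have e : i + 1 + (List.takeWhile PySem.Chars.isdigit rest).length = i + ((List.takeWhile PySem.Chars.isdigit rest).length + 1) := by omega
        rw [e]
    · cases st with
      | none =>
        rw [groupStep, if_neg hd, hlen, ih (i + 1) sp none]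
        rw [spansOf_cons, if_neg hd]
      | some a =>
        rw [groupStep, if_neg hd, hlen, ih (i + 1) (sp ++ [(a, i)]) none]
        simp only [List.takeWhile_cons, List.dropWhile_cons, hd, Bool.false_eq_true, ite_false,
          List.length_nil, Nat.add_zero, List.append_assoc, List.cons_append, List.nil_append]
        rw [spansOf_cons, if_neg hd]

-- A's outer loop equals B's span filtering, over any suffix of cur
theorem aLoop_eq (prev cur nxt : List Char) (ri : Int) :
    ∀ n (l : List Char), l.length = n → ∀ (i : Nat) (res : List String), cur.drop i = l →
      aLoop prev cur nxt ri i res = res ++ collectParts prev cur nxt ri (spansOf i l) := by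
  intro n
  induction n using Nat.strong_induction_on with
  | _ n ih =>
    intro l hl i res hdrop
    match l, hl with
    | [], hl =>
      have hi : cur.length ≤ i := by
        have := List.drop_eq_nil_iff.mp hdrop
        omega
      rw [aLoop, dif_neg (by omega)]
      simp [spansOf_nil, collectParts]
    | c :: rest, hl =>
      have h1 : (cur.drop i).length = cur.length - i := List.length_drop ..
      rw [hdrop, List.length_cons] at h1
      have hi : i < cur.length := by omega
      rw [aLoop, dif_pos hi]
      simp only [hdrop, getNumber_eq, List.nil_append]
      have htle : ((c :: rest).takeWhile PySem.Chars.isdigit).length ≤ (c :: rest).length :=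
        (List.takeWhile_prefix _).length_le
      by_cases hd : PySem.Chars.isdigit c
      · have htw : 1 ≤ ((c :: rest).takeWhile PySem.Chars.isdigit).length := by
          simp [hd]
        rw [dif_neg (by omega)]
        set t := ((c :: rest).takeWhile PySem.Chars.isdigit).length with ht
        have hdrop' : cur.drop (i + t) = (c :: rest).drop t := by
          rw [← hdrop, List.drop_drop]
        have hlen' : ((c :: rest).drop t).length < n := by
          rw [List.length_drop]
          simp only [List.length_cons] at hl htle ⊢
          omega
        rw [ih _ (by omega) _ rfl _ _ hdrop']
        rw [spansOf_cons, if_pos hd]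
        unfold collectParts
        rw [List.filterMap_cons]
        have hsub : i + t - i = t := by omega
        have htake : (cur.drop i).take t = (c :: rest).takeWhile PySem.Chars.isdigit := by
          rw [hdrop, ht, take_takeWhile_len]
        rw [hasAdjA_eq_findSymbol]
        simp only [hsub, htake, ← ht]
        by_cases hs : (findSymbol prev cur nxt i t pySymbols ri).isSome
        · simp [hs]
        · simp [hs]
      · have htw : ((c :: rest).takeWhile PySem.Chars.isdigit).length = 0 := by
          simp [hd]
        rw [dif_pos htw]
        have hdrop' : cur.drop (i + 1) = rest := by
          rw [← List.drop_drop, hdrop]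
          rfl
        rw [ih rest.length (by simp only [List.length_cons] at hl; omega) rest rfl (i + 1) res hdrop']
        rw [spansOf_cons, if_neg hd]

-- ===== VERDICT (by name: the statement is the Claim_ definition above) =====
theorem get_part_numbers_spec : Claim_equal_get_part_numbers := by
  intro prev cur nxt ri gears _
  unfold Spec_get_part_numbers get_part_numbers get_part_numbers_alt
  rw [aLoop_eq prev.toList cur.toList nxt.toList ri cur.toList.length cur.toList rfl 0 [] (by simp)]
  rw [List.nil_append]
  congr 1
  unfold digitSpans
  have := groupStep_spec cur.toList 0 [] none
  simp only [Nat.zero_add, List.nil_append] at this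
  rw [this]
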